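-- pv_equiv track=rewrite | github.com/manjeetbhati/pypdf2mp3 | pdftopunjabi/pdf_to_punjabi.py | resseamble_words
-- ===== SOURCE A (Python) =====
-- def resseamble_words(page_data):
--     lines = page_data.split(' \n')
--     data = ''
--     for line in lines:
--         data += line.replace('\n', '')
--     data.replace('....', '.')
--     data.replace('...', '.')
--     data = data.split(" ")
--     org_data = ''
--     for i in range(0, len(data)-1):
--         if i%13 == 0:
--             org_data += ' \n '
--         org_data += data[i] + " "
--     return org_data
-- ===== SOURCE B (Python) =====
-- def resseamble_words(page_data):
--     data = page_data.replace(' \n', '').replace('\n', '')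
--     words = data.split(' ')[:-1]
--     chunks = [words[i:i + 13] for i in range(0, len(words), 13)]
--     return ''.join(' \n ' + ' '.join(chunk) + ' ' for chunk in chunks)
-- ===== Notes on version B (the rewrite author's own statement) =====
-- stated objective: alternative
-- what changed: Cleaning is done by two whole-string replace calls instead of split-then-per-line-replace-and-concatenate, and the 13-word line breaks are produced by grouping the words into consecutive 13-slices and joining each chunk, instead of a flat index loop testing i % 13 on every word.
import Mathlib
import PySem

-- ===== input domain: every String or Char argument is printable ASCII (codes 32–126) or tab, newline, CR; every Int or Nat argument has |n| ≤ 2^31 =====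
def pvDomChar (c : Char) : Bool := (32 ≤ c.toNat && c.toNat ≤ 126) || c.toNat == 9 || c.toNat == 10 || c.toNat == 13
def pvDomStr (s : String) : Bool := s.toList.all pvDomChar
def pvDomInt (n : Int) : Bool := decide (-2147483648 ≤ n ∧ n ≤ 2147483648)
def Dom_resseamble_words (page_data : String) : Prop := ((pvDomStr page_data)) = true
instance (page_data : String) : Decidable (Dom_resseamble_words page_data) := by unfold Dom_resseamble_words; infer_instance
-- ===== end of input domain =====

-- B cleans the text with two whole-string replaces and emits the 13-word lines chunk by chunk
-- (slice + join) instead of A's split/per-line-replace/concat followed by a flat i % 13 index loop.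

-- ===== PORT A =====
def resseamble_words (page_data : String) : String :=
  -- lines = page_data.split(' \n')   (separator is nonempty, so split? is `some`)
  let lines : List String := (PySem.Str.split? page_data " \n").getD []
  let data : String := lines.foldl (fun d line => d ++ PySem.Str.replace line "\n" "") ""
  -- the two bare `data.replace(...)` statements in the Python discard their results
  let _ := PySem.Str.replace data "...." "."
  let _ := PySem.Str.replace data "..." "."
  let data2 : List String := (PySem.Str.split? data " ").getD []
  (PySem.List.pyRange 0 ((data2.length : Int) - 1) 1).foldl
    (fun org i =>
      (if PySem.Int.mod i 13 == 0 then org ++ " \n " else org)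
        ++ PySem.List.pyGetD data2 i "" ++ " ")
    ""

-- ===== PORT B =====
def resseamble_words_alt (page_data : String) : String :=
  let data : String := PySem.Str.replace (PySem.Str.replace page_data " \n" "") "\n" ""
  let words : List String := PySem.List.slice ((PySem.Str.split? data " ").getD []) none (some (-1))
  let chunks : List (List String) :=
    (PySem.List.pyRange 0 (words.length : Int) 13).map
      (fun i => PySem.List.slice words (some i) (some (i + 13)))
  PySem.Str.join "" (chunks.map (fun chunk => " \n " ++ PySem.Str.join " " chunk ++ " "))

-- ===== PRECONDITION & SPEC =====
def Spec_resseamble_words (page_data : String) (out : String) : Prop := out = resseamble_words_alt page_data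
instance (page_data : String) (out : String) : Decidable (Spec_resseamble_words page_data out) := by unfold Spec_resseamble_words; infer_instance

-- ===== CLAIM (what is proved, stated in full; the proofs are below) =====
def Claim_equal_resseamble_words : Prop := ∀ (page_data : String), Dom_resseamble_words page_data → Spec_resseamble_words page_data (resseamble_words page_data)

-- ===== LEMMAS AND PROOFS =====

-- the combined cleaning: every ' \n' pair is removed (left to right), like `replace(' \n','')`
def remSN : List Char → List Char
  | [] => []
  | [c] => [c]
  | c :: d :: t => if c = ' ' ∧ d = '\n' then remSN t else c :: remSN (d :: t)

theorem toList_nl3 : (" \n " : String).toList = [' ', '\n', ' '] := rfl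
theorem toList_nl1 : ("\n" : String).toList = ['\n'] := rfl
theorem toList_sep : (" \n" : String).toList = [' ', '\n'] := rfl
theorem toList_sp : (" " : String).toList = [' '] := rfl
theorem toList_empty : ("" : String).toList = [] := rfl

theorem enumerate_cons {α : Type} (x : α) (t : List α) (s : ℤ) :
    PySem.List.enumerate (x :: t) s = (s, x) :: PySem.List.enumerate t (s + 1) := rfl

theorem replGo_newline (fuel : ℕ) : ∀ (l acc : List Char), l.length ≤ fuel →
    PySem.Chars.replace.go ['\n'] [] fuel l acc
      = acc.reverse ++ l.filter (fun x => !(x == '\n')) := by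
  induction fuel with
  | zero =>
    intro l acc h
    have hl : l = [] := List.eq_nil_of_length_eq_zero (by omega)
    subst hl; simp [PySem.Chars.replace.go]
  | succ f ih =>
    intro l acc h
    cases l with
    | nil => simp [PySem.Chars.replace.go]
    | cons c t =>
      by_cases hc : c = '\n'
      · subst hc
        have hp : List.isPrefixOf ['\n'] ('\n' :: t) = true := by simp [List.isPrefixOf]
        simp only [PySem.Chars.replace.go, hp, if_pos]
        rw [show List.drop (['\n'] : List Char).length ('\n' :: t) = t from by simp,
            show (([] : List Char).reverse ++ acc) = acc from by simp]
        rw [ih t acc (by simpa using Nat.le_of_succ_le_succ h)]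
        simp
      · have hp : List.isPrefixOf ['\n'] (c :: t) = false := by
          simp [List.isPrefixOf]; exact fun hh => hc hh.symm
        simp only [PySem.Chars.replace.go, hp]
        rw [ih t (c :: acc) (by simpa using Nat.le_of_succ_le_succ h)]
        simp [hc]

theorem replace_newline (l : List Char) :
    PySem.Chars.replace l ['\n'] [] = l.filter (fun x => !(x == '\n')) := by
  simp only [PySem.Chars.replace]
  rw [if_neg (by simp)]
  simpa using replGo_newline l.length l [] (le_refl _)

theorem replGo_sep (fuel : ℕ) : ∀ (l acc : List Char), l.length ≤ fuel →
    PySem.Chars.replace.go [' ', '\n'] [] fuel l acc = acc.reverse ++ remSN l := by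
  induction fuel with
  | zero =>
    intro l acc h
    have hl : l = [] := List.eq_nil_of_length_eq_zero (by omega)
    subst hl; simp [PySem.Chars.replace.go, remSN]
  | succ f ih =>
    intro l acc h
    cases l with
    | nil => simp [PySem.Chars.replace.go, remSN]
    | cons c t =>
      cases t with
      | nil =>
        have hp : List.isPrefixOf [' ', '\n'] [c] = false := by simp [List.isPrefixOf]
        simp only [PySem.Chars.replace.go, hp]
        have h1 : ([] : List Char).length ≤ f := by simp
        rw [ih [] (c :: acc) h1]
        simp [remSN]
      | cons d t' =>
        by_cases hcd : c = ' ' ∧ d = '\n'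
        · have hp : List.isPrefixOf [' ', '\n'] (c :: d :: t') = true := by
            simp [List.isPrefixOf, hcd.1, hcd.2]
          simp only [PySem.Chars.replace.go, hp, if_pos]
          have hlen : t'.length ≤ f := by simp at h; omega
          rw [show List.drop ([' ', '\n'] : List Char).length (c :: d :: t') = t' by simp,
              show (([] : List Char).reverse ++ acc) = acc from by simp]
          rw [ih t' acc hlen]
          simp [remSN, hcd]
        · have hp : List.isPrefixOf [' ', '\n'] (c :: d :: t') = false := by
            simp [List.isPrefixOf]
            intro h1 h2; exact absurd ⟨h1.symm, h2.symm⟩ hcd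
          simp only [PySem.Chars.replace.go, hp]
          have hlen : (d :: t').length ≤ f := by simp at h ⊢; omega
          rw [ih (d :: t') (c :: acc) hlen]
          simp [remSN, hcd]

theorem replace_sep (l : List Char) :
    PySem.Chars.replace l [' ', '\n'] [] = remSN l := by
  simp only [PySem.Chars.replace]
  rw [if_neg (by simp)]
  simpa using replGo_sep l.length l [] (le_refl _)

theorem splitGo_flatten (fuel : ℕ) : ∀ (l cur : List Char) (acc : List (List Char)), l.length < fuel →
    (PySem.Chars.splitOn.go [' ', '\n'] fuel l cur acc).flatten
      = acc.reverse.flatten ++ cur.reverse ++ remSN l := by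
  induction fuel with
  | zero => intro l cur acc h; omega
  | succ f ih =>
    intro l cur acc h
    cases l with
    | nil => simp [PySem.Chars.splitOn.go, remSN]
    | cons c t =>
      cases t with
      | nil =>
        have hp : List.isPrefixOf [' ', '\n'] [c] = false := by simp [List.isPrefixOf]
        simp only [PySem.Chars.splitOn.go, hp]
        rw [if_neg (by simp)]
        have h1 : ([] : List Char).length < f := by simp at h ⊢; omega
        rw [ih [] (c :: cur) acc h1]
        simp [remSN]
      | cons d t' =>
        by_cases hcd : c = ' ' ∧ d = '\n'
        · have hp : List.isPrefixOf [' ', '\n'] (c :: d :: t') = true := by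
            simp [List.isPrefixOf, hcd.1, hcd.2]
          simp only [PySem.Chars.splitOn.go, hp, if_pos]
          have hlen : t'.length < f := by simp at h; omega
          rw [show List.drop ([' ', '\n'] : List Char).length (c :: d :: t') = t' by simp]
          rw [ih t' [] (cur.reverse :: acc) hlen]
          simp [remSN, hcd]
        · have hp : List.isPrefixOf [' ', '\n'] (c :: d :: t') = false := by
            simp [List.isPrefixOf]
            intro h1 h2; exact absurd ⟨h1.symm, h2.symm⟩ hcd
          simp only [PySem.Chars.splitOn.go, hp]
          rw [if_neg (by simp)]
          have hlen : (d :: t').length < f := by simp at h ⊢; omega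
          rw [ih (d :: t') (c :: cur) acc hlen]
          simp [remSN, hcd]

theorem flatten_splitOn (l : List Char) :
    (PySem.Chars.splitOn l [' ', '\n']).flatten = remSN l := by
  simp only [PySem.Chars.splitOn]
  rw [splitGo_flatten (l.length + 1) l [] [] (by omega)]
  simp

theorem foldl_toList_hom {α : Type} (F : String → α → String) (G : List Char → α → List Char)
    (h : ∀ s x, (F s x).toList = G s.toList x) :
    ∀ (l : List α) (init : String), (l.foldl F init).toList = l.foldl G init.toList := by
  intro l
  induction l with
  | nil => intro init; simp
  | cons x t ih => intro init; simp only [List.foldl_cons]; rw [ih, h]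

theorem foldl_append_flatten {α : Type} (f : α → List Char) :
    ∀ (l : List α) (init : List Char),
      l.foldl (fun d x => d ++ f x) init = init ++ (l.map f).flatten := by
  intro l
  induction l with
  | nil => intro init; simp
  | cons x t ih => intro init; simp only [List.foldl_cons, List.map_cons, List.flatten_cons]
                   rw [ih]; simp

-- phase 1: A's split/per-line-replace/concat equals B's two replaces
theorem clean_eq (p : String) :
    ((PySem.Str.split? p " \n").getD []).foldl
        (fun d line => d ++ PySem.Str.replace line "\n" "") ""
      = PySem.Str.replace (PySem.Str.replace p " \n" "") "\n" "" := by
  rw [← String.toList_inj]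
  rw [foldl_toList_hom _ (fun d (w : String) => d ++ PySem.Chars.replace w.toList ['\n'] [])
      (by intro s x; simp [toList_nl1])]
  simp only [PySem.Str.split?, PySem.Chars.split?, toList_sep, toList_empty]
  rw [if_neg (by simp)]
  simp only [Option.map_some, Option.getD_some, List.foldl_map, String.toList_ofList]
  rw [foldl_append_flatten]
  simp only [List.nil_append]
  have h1 : (PySem.Chars.splitOn p.toList [' ', '\n']).map
      (fun piece => PySem.Chars.replace piece ['\n'] [])
      = (PySem.Chars.splitOn p.toList [' ', '\n']).map
          (fun piece => piece.filter (fun x => !(x == '\n'))) := by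
    apply List.map_congr_left; intro x _; exact replace_newline x
  rw [h1, ← List.filter_flatten, flatten_splitOn]
  simp [PySem.Str.toList_replace, toList_nl1, toList_sep, replace_sep,
    replace_newline]

-- phase 2 machinery, at the List Char level
def bodyC (org : List Char) (p : ℤ × List Char) : List Char :=
  (if PySem.Int.mod p.1 13 == 0 then org ++ [' ', '\n', ' '] else org) ++ p.2 ++ [' ']

def chunkF (vs : List (List Char)) (i : ℤ) : List Char :=
  [' ', '\n', ' '] ++ PySem.Chars.join [' '] (PySem.List.slice vs (some i) (some (i + 13))) ++ [' ']

theorem join_sp_flatten (c0 : List Char) (ct : List (List Char)) :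
    PySem.Chars.join [' '] (c0 :: ct) ++ [' ']
      = c0 ++ [' '] ++ (ct.map (· ++ [' '])).flatten := by
  induction ct generalizing c0 with
  | nil => simp [PySem.Chars.join_singleton]
  | cons d r ih =>
    rw [PySem.Chars.join_cons_cons]
    simp only [List.map_cons, List.flatten_cons]
    rw [List.append_assoc, ih d]

theorem intercalate_nil_flatten (L : List (List Char)) :
    PySem.Chars.join [] L = L.flatten := by
  induction L with
  | nil => simp [PySem.Chars.join_nil]
  | cons x r ih =>
    cases r with
    | nil => simp [PySem.Chars.join_singleton]
    | cons y r' => rw [PySem.Chars.join_cons_cons]; simp only [List.flatten_cons]; rw [ih]; simp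

theorem tail_fold : ∀ (t : List (List Char)) (k j : ℕ) (init : List Char), 1 ≤ j → j + t.length ≤ 13 →
    (PySem.List.enumerate t ((13 * k + j : ℕ) : ℤ)).foldl bodyC init
      = init ++ (t.map (· ++ [' '])).flatten := by
  intro t
  induction t with
  | nil => intro k j init h1 h2; simp
  | cons w t ih =>
    intro k j init h1 h2
    rw [enumerate_cons, List.foldl_cons]
    have hj12 : j ≤ 12 := by simp at h2; omega
    have hb : bodyC init ((((13 * k + j : ℕ) : ℤ)), w) = init ++ w ++ [' '] := by
      simp [bodyC]
      omega
    rw [hb]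
    have hst : (((13 * k + j : ℕ) : ℤ)) + 1 = (((13 * k + (j + 1) : ℕ) : ℤ)) := by push_cast; ring
    rw [hst, ih k (j + 1) _ (by omega) (by simp at h2 ⊢; omega)]
    simp

theorem chunk_fold (c0 : List Char) (ct : List (List Char)) (k : ℕ) (init : List Char)
    (h : ct.length ≤ 12) :
    (PySem.List.enumerate (c0 :: ct) ((13 * k : ℕ) : ℤ)).foldl bodyC init
      = init ++ [' ', '\n', ' '] ++ PySem.Chars.join [' '] (c0 :: ct) ++ [' '] := by
  rw [enumerate_cons, List.foldl_cons]
  have hb : bodyC init ((((13 * k : ℕ) : ℤ)), c0) = init ++ [' ', '\n', ' '] ++ c0 ++ [' '] := by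
    simp [bodyC]
  rw [hb]
  have hst : (((13 * k : ℕ) : ℤ)) + 1 = (((13 * k + 1 : ℕ) : ℤ)) := by push_cast; ring
  rw [hst, tail_fold ct k 1 _ (by omega) (by omega)]
  have hj := join_sp_flatten c0 ct
  simp only [List.append_assoc] at hj ⊢
  rw [hj]

theorem pyRange13_eq (L : ℕ) :
    PySem.List.pyRange 0 (L : ℤ) 13
      = (List.range ((L + 12) / 13)).map (fun j => ((13 * j : ℕ) : ℤ)) := by
  rw [PySem.List.pyRange_of_pos _ _ (by norm_num)]
  have hn : (if (0 : ℤ) < (L : ℤ) then (((L : ℤ) - 0 + 13 - 1) / 13).toNat else 0)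
      = (L + 12) / 13 := by
    split <;> omega
  rw [hn]
  apply List.map_congr_left
  intro j _
  push_cast; ring

theorem chunkF_shift (vs : List (List Char)) (j : ℕ) :
    chunkF vs ((13 * (j + 1) : ℕ) : ℤ) = chunkF (vs.drop 13) ((13 * j : ℕ) : ℤ) := by
  unfold chunkF
  have h1 : ((13 * (j + 1) : ℕ) : ℤ) + 13 = ((13 * (j + 1) + 13 : ℕ) : ℤ) := by push_cast; ring
  have h2 : ((13 * j : ℕ) : ℤ) + 13 = ((13 * j + 13 : ℕ) : ℤ) := by push_cast; ring
  rw [h1, h2, PySem.List.slice_natCast, PySem.List.slice_natCast]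
  have h3 : (vs.drop 13).drop (13 * j) = vs.drop (13 * (j + 1)) := by
    rw [List.drop_drop]; congr 1; omega
  rw [show 13 * (j + 1) + 13 - 13 * (j + 1) = 13 from by omega,
      show 13 * j + 13 - 13 * j = 13 from by omega, h3]

theorem main_fold (vs : List (List Char)) (k : ℕ) (init : List Char) :
    (PySem.List.enumerate vs ((13 * k : ℕ) : ℤ)).foldl bodyC init
      = init ++ ((List.range ((vs.length + 12) / 13)).map
          (fun j => chunkF vs ((13 * j : ℕ) : ℤ))).flatten := by
  by_cases hv : vs = []
  · subst hv
    rw [show (List.length ([] : List (List Char)) + 12) / 13 = 0 from by simp]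
    simp
  · by_cases hr : vs.drop 13 = []
    · have hlen : vs.length ≤ 13 := by
        have := List.drop_eq_nil_iff.mp hr
        omega
      obtain ⟨c0, ct, hvct⟩ : ∃ c0 ct, vs = c0 :: ct := by
        cases vs with
        | nil => exact absurd rfl hv
        | cons a b => exact ⟨a, b, rfl⟩
      subst hvct
      have hct : ct.length ≤ 12 := by simp at hlen; omega
      rw [chunk_fold c0 ct k init hct]
      rw [show ((c0 :: ct).length + 12) / 13 = 1 from by simp; omega]
      have hsl : PySem.List.slice (c0 :: ct) (some ((13 * 0 : ℕ) : ℤ))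
          (some (((13 * 0 : ℕ) : ℤ) + 13)) = c0 :: ct := by
        rw [show ((13 * 0 : ℕ) : ℤ) + 13 = ((13 : ℕ) : ℤ) from by norm_num,
            show ((13 * 0 : ℕ) : ℤ) = ((0 : ℕ) : ℤ) from by norm_num,
            PySem.List.slice_natCast]
        simp [List.take_of_length_le hlen]
      rw [show List.range 1 = [0] from rfl]
      simp only [List.map_cons, List.map_nil, List.flatten_cons, List.flatten_nil,
        List.append_nil]
      unfold chunkF
      rw [hsl]
      simp
    · have hgt : 13 < vs.length := by
        have h1 : (vs.drop 13).length = vs.length - 13 := List.length_drop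
        have h2 : 0 < (vs.drop 13).length := List.length_pos_of_ne_nil hr
        omega
      have htake : (vs.take 13).length = 13 := by simp; omega
      obtain ⟨c0, ct, h13⟩ : ∃ c0 ct, vs.take 13 = c0 :: ct := by
        cases htk : vs.take 13 with
        | nil => rw [htk] at htake; simp at htake
        | cons a b => exact ⟨a, b, rfl⟩
      have hlen13 : (c0 :: ct).length = 13 := by rw [← h13]; exact htake
      have hct : ct.length ≤ 12 := by simp at hlen13; omega
      conv_lhs => rw [show vs = vs.take 13 ++ vs.drop 13 from (List.take_append_drop 13 vs).symm]
      rw [PySem.List.enumerate_append, List.foldl_append, h13, chunk_fold c0 ct k init hct]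
      rw [show ((13 * k : ℕ) : ℤ) + ((c0 :: ct).length : ℤ) = ((13 * (k + 1) : ℕ) : ℤ) from by
        rw [hlen13]; push_cast; ring]
      rw [main_fold (vs.drop 13) (k + 1)]
      rw [show (vs.length + 12) / 13 = ((vs.drop 13).length + 12) / 13 + 1 from by
        rw [List.length_drop]; omega]
      rw [List.range_succ_eq_map, List.map_cons, List.map_map, List.flatten_cons]
      have hhead : chunkF vs ((13 * 0 : ℕ) : ℤ)
          = [' ', '\n', ' '] ++ PySem.Chars.join [' '] (c0 :: ct) ++ [' '] := by
        unfold chunkF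
        rw [show ((13 * 0 : ℕ) : ℤ) + 13 = ((13 : ℕ) : ℤ) from by norm_num,
            show ((13 * 0 : ℕ) : ℤ) = ((0 : ℕ) : ℤ) from by norm_num,
            PySem.List.slice_natCast]
        simp only [Nat.sub_zero, List.drop_zero]
        rw [h13]
      have htail : (List.range (((vs.drop 13).length + 12) / 13)).map
            ((fun j => chunkF vs ((13 * j : ℕ) : ℤ)) ∘ Nat.succ)
          = (List.range (((vs.drop 13).length + 12) / 13)).map
            (fun j => chunkF (vs.drop 13) ((13 * j : ℕ) : ℤ)) := by
        apply List.map_congr_left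
        intro j _
        simp only [Function.comp_apply]
        rw [show Nat.succ j = j + 1 from rfl, chunkF_shift]
      rw [htail, hhead]
      simp
termination_by vs.length
decreasing_by
  simp [List.length_drop]; omega

theorem slice_map {α β : Type} (f : α → β) (xs : List α) (a? b? : Option ℤ) :
    PySem.List.slice (xs.map f) a? b? = (PySem.List.slice xs a? b?).map f := by
  cases a? <;> cases b? <;>
    simp only [PySem.List.slice, List.length_map, ← List.map_take, ← List.map_drop]

theorem pyGetD_dropLast {α : Type} (xs : List α) (d : α) (k : ℕ) (hk : k < xs.dropLast.length) :
    PySem.List.pyGetD xs (k : ℤ) d = PySem.List.pyGetD xs.dropLast (k : ℤ) d := by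
  have hk' : k < xs.length := by
    have := List.length_dropLast (xs := xs)
    omega
  rw [PySem.List.pyGetD_of_nonneg _ _ (Int.natCast_nonneg k),
      PySem.List.pyGetD_of_nonneg _ _ (Int.natCast_nonneg k)]
  simp only [Int.toNat_natCast]
  rw [List.getD_eq_getElem _ _ hk', List.getD_eq_getElem _ _ hk]
  exact (List.getElem_dropLast hk).symm

-- ===== VERDICT (by name: the statement is the Claim_ definition above) =====
set_option maxHeartbeats 1000000 in
theorem resseamble_words_spec : Claim_equal_resseamble_words := by
  intro p _
  unfold Spec_resseamble_words
  simp only [resseamble_words, resseamble_words_alt]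
  rw [clean_eq p]
  generalize (PySem.Str.split? (PySem.Str.replace (PySem.Str.replace p " \n" "") "\n" "") " ").getD []
    = ws
  rw [← String.toList_inj]
  rw [foldl_toList_hom _
      (fun o (i : ℤ) => (if PySem.Int.mod i 13 == 0 then o ++ [' ', '\n', ' '] else o)
        ++ PySem.List.pyGetD (ws.map String.toList) i [] ++ [' '])
      (by
        intro s x
        have hg : (PySem.List.pyGetD ws x "").toList
            = PySem.List.pyGetD (ws.map String.toList) x [] := by
          have h := PySem.List.pyGetD_map String.toList ws x ""
          simpa using h.symm
        simp only [String.toList_append, hg, toList_sp, apply_ite String.toList, toList_nl3])]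
  by_cases hn : ws = []
  · simp [hn, PySem.List.slice_to_neg_one, PySem.Str.toList_join,
      PySem.Chars.join_nil, PySem.List.pyRange_of_pos (0 : ℤ) 0 (show (0:ℤ) < 13 from by norm_num)]
  · have hn1 : 0 < ws.length := List.length_pos_of_ne_nil hn
    set vs : List (List Char) := (ws.map String.toList).dropLast with hvs
    have hvlen : vs.length = ws.length - 1 := by simp [hvs]
    -- ===== A side =====
    rw [show ((ws.length : ℤ) - 1) = ((vs.length : ℕ) : ℤ) from by rw [hvlen]; omega]
    rw [PySem.List.pyRange_one, List.foldl_map]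
    simp only [Int.sub_zero, Int.toNat_natCast, zero_add]
    rw [toList_empty]
    have hA : (List.range vs.length).foldl
        (fun o (k : ℕ) => (if PySem.Int.mod (k : ℤ) 13 == 0 then o ++ [' ', '\n', ' '] else o)
          ++ PySem.List.pyGetD (ws.map String.toList) (k : ℤ) [] ++ [' ']) []
        = (List.range vs.length).foldl
        (fun o (k : ℕ) => bodyC o ((k : ℤ), PySem.List.pyGetD vs (k : ℤ) [])) [] := by
      apply PySem.List.foldl_congr_mem
      intro acc k hk
      rw [List.mem_range] at hk
      rw [show PySem.List.pyGetD (ws.map String.toList) (k : ℤ) []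
          = PySem.List.pyGetD vs (k : ℤ) [] from by
        rw [hvs]; exact pyGetD_dropLast (ws.map String.toList) [] k (by simp [← hvs]; omega)]
      rfl
    rw [hA]
    have hB : (List.range vs.length).foldl
        (fun o (k : ℕ) => bodyC o ((k : ℤ), PySem.List.pyGetD vs (k : ℤ) [])) []
        = (PySem.List.enumerate vs ((13 * 0 : ℕ) : ℤ)).foldl bodyC [] := by
      rw [show ((13 * 0 : ℕ) : ℤ) = (0 : ℤ) from by norm_num]
      rw [PySem.List.enumerate_eq_map_pyRange vs ([] : List Char)]
      rw [List.foldl_map]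
      have hrange : PySem.List.pyRange 0 (PySem.List.len vs)
          = (List.range vs.length).map (fun (k : ℕ) => (k : ℤ)) := by
        rw [PySem.List.pyRange_one]
        rw [show (PySem.List.len vs - 0).toNat = vs.length from by simp [PySem.List.len]]
        apply List.map_congr_left
        intro k _
        omega
      rw [hrange, List.foldl_map]
    rw [hB, main_fold vs 0 []]
    -- ===== B side =====
    rw [PySem.Str.toList_join]
    rw [show ("" : String).toList = ([] : List Char) from rfl]
    rw [intercalate_nil_flatten]
    rw [PySem.List.slice_to_neg_one]
    simp only [List.map_map, List.nil_append]
    congr 1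
    rw [show ((List.dropLast ws).length : ℤ) = ((vs.length : ℕ) : ℤ) from by
      simp [hvs]]
    rw [pyRange13_eq vs.length, List.map_map]
    apply List.map_congr_left
    intro j _
    simp only [Function.comp_apply]
    rw [show chunkF vs ((13 * j : ℕ) : ℤ)
        = [' ', '\n', ' '] ++ PySem.Chars.join [' ']
            (PySem.List.slice vs (some ((13 * j : ℕ) : ℤ)) (some (((13 * j : ℕ) : ℤ) + 13)))
          ++ [' '] from rfl]
    rw [show PySem.List.slice vs (some ((13 * j : ℕ) : ℤ)) (some (((13 * j : ℕ) : ℤ) + 13))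
        = (PySem.List.slice (ws.dropLast) (some ((13 * j : ℕ) : ℤ))
            (some (((13 * j : ℕ) : ℤ) + 13))).map String.toList from by
      rw [hvs, ← List.map_dropLast, slice_map]]
    simp [PySem.Str.toList_join, toList_nl3, toList_sp]
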